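-- pv_equiv track=rewrite | github.com/lixiang2017/leetcode | contest/weekly-contest-291/6048.0_Minimum_Consecutive_Cards_to_Pick_Up.py | minimumCardPickup
-- ===== SOURCE A (Python) =====
-- from typing import List
--
-- def minimumCardPickup(cards: List[int]) -> int:
--     ans = 100006
--     pos = dict()
--     for i, c in enumerate(cards):
--         if c in pos:
--             p = pos[c]
--             ans = min(ans, i - p + 1)
--         pos[c] = i
--
--     return ans if ans != 100006 else -1
-- ===== SOURCE B (Python) =====
-- from typing import List
--
-- def minimumCardPickup(cards: List[int]) -> int:
--     # two-phase: group all indices by value, then scan consecutive index pairs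
--     groups = {}
--     for i, c in enumerate(cards):
--         groups.setdefault(c, []).append(i)
--     ans = 100006
--     for idxs in groups.values():
--         for a, b in zip(idxs, idxs[1:]):
--             ans = min(ans, b - a + 1)
--     return ans if ans != 100006 else -1
-- ===== Notes on version B (the rewrite author's own statement) =====
-- stated objective: alternative
-- what changed: Replaces the single pass that tracks only the last position of each value with a two-phase algorithm: first group all indices by value into lists, then scan each group's consecutive index pairs for the minimum gap.
import Mathlib
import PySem

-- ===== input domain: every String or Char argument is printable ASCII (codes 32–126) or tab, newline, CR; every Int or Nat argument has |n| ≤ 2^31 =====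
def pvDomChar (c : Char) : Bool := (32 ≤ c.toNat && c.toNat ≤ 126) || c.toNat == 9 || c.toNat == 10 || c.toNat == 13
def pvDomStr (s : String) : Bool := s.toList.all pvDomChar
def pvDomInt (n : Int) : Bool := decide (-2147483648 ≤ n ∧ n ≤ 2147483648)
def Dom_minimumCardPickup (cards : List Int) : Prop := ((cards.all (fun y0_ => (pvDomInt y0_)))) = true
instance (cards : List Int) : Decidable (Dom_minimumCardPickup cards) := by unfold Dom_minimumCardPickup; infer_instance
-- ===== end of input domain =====

-- B replaces A's single pass (dict of last positions) by a two-phase algorithm: group all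
-- indices by value, then scan consecutive index pairs per group; same cost, different shape.

-- ===== PORT A =====
def minimumCardPickup (cards : List Int) : Int :=
  let st := (PySem.List.enumerate cards).foldl
    (fun (s : Int × PySem.Dict Int Int) (ic : Int × Int) =>
      match s.2.get? ic.2 with
      | some p => (min s.1 (ic.1 - p + 1), s.2.insert ic.2 ic.1)
      | none => (s.1, s.2.insert ic.2 ic.1))
    (100006, PySem.Dict.empty)
  if st.1 ≠ 100006 then st.1 else -1

-- ===== PORT B =====
def minimumCardPickup_alt (cards : List Int) : Int :=
  -- phase 1: groups.setdefault(c, []).append(i)  =  groups[c] = groups.get(c, []) + [i]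
  let groups := (PySem.List.enumerate cards).foldl
    (fun (g : PySem.Dict Int (List Int)) (ic : Int × Int) =>
      g.modify ic.2 [] (fun l => l ++ [ic.1]))
    PySem.Dict.empty
  -- phase 2: for idxs in groups.values(): for a, b in zip(idxs, idxs[1:]): …
  let ans := groups.values.foldl
    (fun (ans : Int) (idxs : List Int) =>
      (idxs.zip idxs.tail).foldl (fun a p => min a (p.2 - p.1 + 1)) ans)
    100006
  if ans ≠ 100006 then ans else -1

-- ===== PRECONDITION & SPEC =====
def Spec_minimumCardPickup (cards : List Int) (out : Int) : Prop := out = minimumCardPickup_alt cards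
instance (cards : List Int) (out : Int) : Decidable (Spec_minimumCardPickup cards out) := by unfold Spec_minimumCardPickup; infer_instance

-- ===== CLAIM (what is proved, stated in full; the proofs are below) =====
def Claim_equal_minimumCardPickup : Prop := ∀ (cards : List Int), Dom_minimumCardPickup cards → Spec_minimumCardPickup cards (minimumCardPickup cards)

-- ===== LEMMAS AND PROOFS =====

/-- the gaps contributed by one group's index list -/
def pvGaps (l : List Int) : List Int := (l.zip l.tail).map (fun p => p.2 - p.1 + 1)

/-- all gaps of a grouping dict, in items order -/
def pvAllGaps (g : PySem.Dict Int (List Int)) : List Int :=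
  g.items.flatMap (fun p => pvGaps p.2)

/-- the running minimum B computes in phase 2 -/
def pvM (g : PySem.Dict Int (List Int)) : Int := List.foldl min 100006 (pvAllGaps g)

theorem pv_foldl_min_out (T : List Int) : ∀ (i d : Int),
    T.foldl min (min i d) = min (T.foldl min i) d := by
  induction T with
  | nil => intro i d; simp [List.foldl]
  | cons t T ih =>
    intro i d
    simp only [List.foldl]
    rw [min_right_comm, ih]

theorem pv_foldl_min_middle (S : List Int) : ∀ (T : List Int) (i d : Int),
    List.foldl min i (S ++ d :: T) = min (List.foldl min i (S ++ T)) d := by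
  induction S with
  | nil => intro T i d; simp only [List.nil_append, List.foldl]; exact pv_foldl_min_out T i d
  | cons x S ih => intro T i d; simp only [List.cons_append, List.foldl]; exact ih T (min i x) d

theorem pvGaps_snoc (l : List Int) (b : Int) :
    pvGaps (l ++ [b]) = pvGaps l ++ ((l.getLast?).map (fun a => b - a + 1)).toList := by
  induction l with
  | nil => simp [pvGaps]
  | cons x l ih =>
    cases l with
    | nil => simp [pvGaps]
    | cons y l' =>
      have h1 : pvGaps ((x :: y :: l') ++ [b]) = (y - x + 1) :: pvGaps ((y :: l') ++ [b]) := by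
        simp [pvGaps]
      have h2 : pvGaps (x :: y :: l') = (y - x + 1) :: pvGaps (y :: l') := by
        simp [pvGaps]
      rw [h1, ih, h2, List.getLast?_cons_cons, List.cons_append]

/-- the modify step of phase 1 updates pvM exactly as A's running minimum does -/
theorem pvMstep (g : PySem.Dict Int (List Int)) (hnd : g.keys.Nodup) (c i : Int) :
    pvM (g.modify c [] (fun l => l ++ [i])) =
      match (g.getD c []).getLast? with
      | none => pvM g
      | some p => min (pvM g) (i - p + 1) := by
  have hmod : g.modify c [] (fun l => l ++ [i]) = g.insert c (g.getD c [] ++ [i]) := rfl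
  by_cases hc : g.contains c = true
  · -- key already present: its list gains one index, hence (possibly) one new gap
    obtain ⟨l, hl⟩ : ∃ l, g.get? c = some l := by
      cases h : g.get? c with
      | none =>
        have hco := PySem.Dict.contains_eq_isSome_get? g c
        rw [hc, h] at hco
        simp at hco
      | some l => exact ⟨l, rfl⟩
    have hgd : g.getD c [] = l := PySem.Dict.getD_of_get?_eq_some _ _ hl
    have hmem : (c, l) ∈ g.items := PySem.Dict.mem_items_of_get?_eq_some _ hl
    obtain ⟨s, t, hst⟩ := List.append_of_mem hmem
    have hkeys : g.keys = s.map Prod.fst ++ c :: t.map Prod.fst := by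
      simp [PySem.Dict.keys, hst]
    rw [hkeys] at hnd
    have hns : ∀ p ∈ s, p.1 ≠ c := fun p hp =>
      (List.nodup_append.mp hnd).2.2 p.1 (List.mem_map_of_mem hp) c (by simp)
    have hnt : ∀ p ∈ t, p.1 ≠ c := by
      have hmid := (List.nodup_append.mp hnd).2.1
      rw [List.nodup_cons] at hmid
      intro p hp h
      exact hmid.1 (by rw [← h]; exact List.mem_map_of_mem hp)
    have hitems : (g.insert c (g.getD c [] ++ [i])).items
        = s ++ (c, l ++ [i]) :: t := by
      rw [PySem.Dict.items_insert_of_contains _ _ hc, hst, hgd]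
      simp only [List.map_append, List.map_cons]
      congr 1
      · rw [List.map_congr_left (fun p hp =>
            show (if (p.1 == c) = true then (c, l ++ [i]) else p) = id p by
              simp [hns p hp]), List.map_id]
      · congr 1
        · simp
        · rw [List.map_congr_left (fun p hp =>
            show (if (p.1 == c) = true then (c, l ++ [i]) else p) = id p by
              simp [hnt p hp]), List.map_id]
    have hAll' : pvAllGaps (g.modify c [] (fun l => l ++ [i]))
        = s.flatMap (fun p => pvGaps p.2) ++ (pvGaps (l ++ [i]) ++ t.flatMap (fun p => pvGaps p.2)) := by
      rw [hmod]; simp [pvAllGaps, hitems]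
    have hAll : pvAllGaps g
        = s.flatMap (fun p => pvGaps p.2) ++ (pvGaps l ++ t.flatMap (fun p => pvGaps p.2)) := by
      simp [pvAllGaps, hst]
    rw [hgd, pvM, hAll', pvGaps_snoc]
    cases hlast : l.getLast? with
    | none =>
      simp only [Option.map_none, Option.toList_none, List.append_nil]
      rw [pvM, hAll]
    | some p =>
      simp only [Option.map_some, Option.toList_some]
      have : s.flatMap (fun p => pvGaps p.2) ++ ((pvGaps l ++ [i - p + 1]) ++ t.flatMap (fun p => pvGaps p.2))
          = (s.flatMap (fun p => pvGaps p.2) ++ pvGaps l) ++ (i - p + 1) :: t.flatMap (fun p => pvGaps p.2) := by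
        simp
      rw [this, pv_foldl_min_middle, pvM, hAll, List.append_assoc]
  · -- fresh key: its singleton list contributes no gap
    have hc' : g.contains c = false := by simpa using hc
    have hgd : g.getD c [] = [] := PySem.Dict.getD_of_not_contains _ _ hc'
    rw [hmod, hgd]
    have hitems : (g.insert c [i]).items = g.items ++ [(c, [i])] := by
      simpa using PySem.Dict.items_insert_of_not_contains g [i] hc'
    simp [pvM, pvAllGaps, hitems, pvGaps]

/-- phase-2 fold of B equals the flat min-fold over all gaps -/
theorem pv_values_fold (vs : List (List Int)) : ∀ (a : Int),
    vs.foldl (fun (ans : Int) (idxs : List Int) =>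
        (idxs.zip idxs.tail).foldl (fun a p => min a (p.2 - p.1 + 1)) ans) a
      = List.foldl min a (vs.flatMap pvGaps) := by
  induction vs with
  | nil => intro a; rfl
  | cons l vs ih =>
    intro a
    simp only [List.foldl, List.flatMap_cons, List.foldl_append]
    rw [ih]
    congr 1
    rw [pvGaps, List.foldl_map]

/-- main invariant: A's running minimum equals pvM of B's grouping dict -/
theorem pv_main (ps : List (Int × Int)) : ∀ (ans : Int) (pos : PySem.Dict Int Int)
    (g : PySem.Dict Int (List Int)),
    g.keys.Nodup →
    (∀ c, pos.get? c = (g.getD c []).getLast?) →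
    ans = pvM g →
    (ps.foldl
      (fun (s : Int × PySem.Dict Int Int) (ic : Int × Int) =>
        match s.2.get? ic.2 with
        | some p => (min s.1 (ic.1 - p + 1), s.2.insert ic.2 ic.1)
        | none => (s.1, s.2.insert ic.2 ic.1)) (ans, pos)).1
    = pvM (ps.foldl
        (fun (g : PySem.Dict Int (List Int)) (ic : Int × Int) =>
          g.modify ic.2 [] (fun l => l ++ [ic.1])) g) := by
  induction ps with
  | nil => intro ans pos g _ _ hans; simpa using hans
  | cons ic ps ih =>
    intro ans pos g hnd hpos hans
    obtain ⟨i, c⟩ := ic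
    simp only [List.foldl]
    have hstep := pvMstep g hnd c i
    have hposc := hpos c
    have hnd' : (g.modify c [] (fun l => l ++ [i])).keys.Nodup := by
      have := PySem.Dict.nodup_keys_foldl_modify_key [c] (fun x => x) []
        (fun _ _ => fun l => l ++ [i]) g hnd
      simpa using this
    have hpos' : ∀ c', (pos.insert c i).get? c'
        = ((g.modify c [] (fun l => l ++ [i])).getD c' []).getLast? := by
      intro c'
      rw [PySem.Dict.get?_insert, PySem.Dict.getD_modify]
      by_cases h : c' = c
      · simp [h]
      · simp [h, hpos c']
    cases hg : pos.get? c with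
    | some p =>
      apply ih _ _ _ hnd' hpos'
      rw [hstep, ← hposc, hg, hans]
    | none =>
      apply ih _ _ _ hnd' hpos'
      rw [hstep, ← hposc, hg, hans]

-- ===== VERDICT (by name: the statement is the Claim_ definition above) =====
theorem minimumCardPickup_spec : Claim_equal_minimumCardPickup := by
  intro cards _
  unfold Spec_minimumCardPickup minimumCardPickup minimumCardPickup_alt
  simp only []
  have hmain := pv_main (PySem.List.enumerate cards) 100006 PySem.Dict.empty PySem.Dict.empty
    (by simp) (by intro c; simp [PySem.Dict.get?_empty, PySem.Dict.getD_empty])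
    (by simp [pvM, pvAllGaps, PySem.Dict.empty])
  rw [pv_values_fold]
  have hflat : ((PySem.List.enumerate cards).foldl
      (fun (g : PySem.Dict Int (List Int)) (ic : Int × Int) =>
        g.modify ic.2 [] (fun l => l ++ [ic.1])) PySem.Dict.empty).values.flatMap pvGaps
      = pvAllGaps ((PySem.List.enumerate cards).foldl
      (fun (g : PySem.Dict Int (List Int)) (ic : Int × Int) =>
        g.modify ic.2 [] (fun l => l ++ [ic.1])) PySem.Dict.empty) := by
    simp [pvAllGaps, PySem.Dict.values, List.flatMap_map]
  rw [hflat, ← pvM, ← hmain]
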